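-- pv_equiv track=rewrite | github.com/mjredmond/tr-text-fabric | scripts/verify_glosses_thorough.py | check_semantic_match
-- ===== SOURCE A (Python) =====
-- def check_semantic_match(our_gloss, reference_gloss):
--     """Check if glosses are semantically similar."""
--     if not reference_gloss:
--         return False
--
--     our_words = set(our_gloss.lower().replace(",", " ").split())
--     ref_words = set(reference_gloss.lower().replace(",", " ").split())
--
--     # Check for any word overlap
--     common = our_words & ref_words
--     if common:
--         return True
--
--     # Check for common synonyms
--     synonyms = {
--         "throw": ["cast", "hurl"],
--         "go": ["went", "going", "come", "came"],
--         "say": ["said", "speak", "spoke", "tell", "told"],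
--         "see": ["saw", "seen", "look"],
--         "give": ["gave", "given"],
--         "take": ["took", "taken", "receive"],
--         "hear": ["heard"],
--         "know": ["knew", "known"],
--         "come": ["came"],
--         "send": ["sent"],
--         "rise": ["rose", "risen", "raise", "raised"],
--         "judge": ["judged"],
--         "save": ["saved"],
--         "believe": ["believed"],
--         "love": ["loved"],
--         "father": ["dad"],
--     }
--
--     for our_word in our_words:
--         if our_word in synonyms:
--             for syn in synonyms[our_word]:
--                 if syn in ref_words:
--                     return True
--         for key, syns in synonyms.items():
--             if our_word in syns and key in ref_words:
--                 return True
--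
--     return False
-- ===== SOURCE B (Python) =====
-- def check_semantic_match(our_gloss, reference_gloss):
--     """Check if glosses are semantically similar."""
--     if not reference_gloss:
--         return False
--
--     our_words = set(our_gloss.lower().replace(",", " ").split())
--     ref_words = set(reference_gloss.lower().replace(",", " ").split())
--
--     if our_words & ref_words:
--         return True
--
--     synonyms = {
--         "throw": ["cast", "hurl"],
--         "go": ["went", "going", "come", "came"],
--         "say": ["said", "speak", "spoke", "tell", "told"],
--         "see": ["saw", "seen", "look"],
--         "give": ["gave", "given"],
--         "take": ["took", "taken", "receive"],
--         "hear": ["heard"],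
--         "know": ["knew", "known"],
--         "come": ["came"],
--         "send": ["sent"],
--         "rise": ["rose", "risen", "raise", "raised"],
--         "judge": ["judged"],
--         "save": ["saved"],
--         "believe": ["believed"],
--         "love": ["loved"],
--         "father": ["dad"],
--     }
--
--     # Reverse adjacency index built once: each word maps to the words it is
--     # directly linked to (key -> its synonyms, synonym -> its key).
--     adjacency = {}
--     for key, syns in synonyms.items():
--         adjacency.setdefault(key, set()).update(syns)
--         for s in syns:
--             adjacency.setdefault(s, set()).add(key)
--
--     return any(adjacency.get(w, set()) & ref_words for w in our_words)
-- ===== Notes on version B (the rewrite author's own statement) =====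
-- stated objective: idiomatic
-- what changed: The per-word key lookup plus full scan of the synonym table is replaced by a reverse adjacency index (word -> set of directly linked words) built once, so each our_word needs a single dict lookup and set intersection instead of scanning every table entry.
import Mathlib
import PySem

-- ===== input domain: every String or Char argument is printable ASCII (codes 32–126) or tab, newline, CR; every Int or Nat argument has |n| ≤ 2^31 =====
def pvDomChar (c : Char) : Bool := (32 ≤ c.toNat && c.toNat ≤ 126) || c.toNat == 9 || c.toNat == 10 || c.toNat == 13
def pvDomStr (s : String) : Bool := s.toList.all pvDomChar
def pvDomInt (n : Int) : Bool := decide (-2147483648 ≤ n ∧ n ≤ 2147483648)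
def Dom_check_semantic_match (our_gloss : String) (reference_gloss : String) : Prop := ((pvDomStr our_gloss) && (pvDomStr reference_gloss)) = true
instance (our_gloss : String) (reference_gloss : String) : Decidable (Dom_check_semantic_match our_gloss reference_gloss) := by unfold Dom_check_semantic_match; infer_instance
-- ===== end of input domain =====

-- B replaces A's per-word scan of the whole synonym table by a reverse adjacency
-- index built once (word -> set of directly linked words); same return value.

-- ===== PORT A =====
def pvSynonyms : PySem.Dict String (List String) := PySem.Dict.mk [
  ("throw", ["cast", "hurl"]),
  ("go", ["went", "going", "come", "came"]),
  ("say", ["said", "speak", "spoke", "tell", "told"]),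
  ("see", ["saw", "seen", "look"]),
  ("give", ["gave", "given"]),
  ("take", ["took", "taken", "receive"]),
  ("hear", ["heard"]),
  ("know", ["knew", "known"]),
  ("come", ["came"]),
  ("send", ["sent"]),
  ("rise", ["rose", "risen", "raise", "raised"]),
  ("judge", ["judged"]),
  ("save", ["saved"]),
  ("believe", ["believed"]),
  ("love", ["loved"]),
  ("father", ["dad"])]

def check_semantic_match (our_gloss : String) (reference_gloss : String) : Bool :=
  if reference_gloss = "" then false
  else
    let our_words : PySem.Set String :=
      PySem.Set.ofList (PySem.Str.split₀ (PySem.Str.replace (PySem.Str.lower our_gloss) "," " "))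
    let ref_words : PySem.Set String :=
      PySem.Set.ofList (PySem.Str.split₀ (PySem.Str.replace (PySem.Str.lower reference_gloss) "," " "))
    let common := PySem.Set.inter our_words ref_words
    if !common.isEmpty then true
    else
      -- the for-loop with early `return True` and final `return False`
      our_words.any (fun our_word =>
        (match pvSynonyms.get? our_word with
         | some syns => syns.any (fun syn => PySem.Set.contains ref_words syn)
         | none => false)
        || pvSynonyms.items.any (fun kv => kv.2.contains our_word && PySem.Set.contains ref_words kv.1))

-- ===== PORT B =====
-- adjacency: for each key K with list L, K -> set(L), and K added to adj[s] for each s in L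
def pvAdjacency : PySem.Dict String (PySem.Set String) :=
  pvSynonyms.items.foldl (fun adj kv =>
    let adj1 := adj.insert kv.1 (PySem.Set.update (adj.getD kv.1 PySem.Set.empty) kv.2)
    kv.2.foldl (fun a s => a.insert s (PySem.Set.add (a.getD s PySem.Set.empty) kv.1)) adj1)
    PySem.Dict.empty

def check_semantic_match_alt (our_gloss : String) (reference_gloss : String) : Bool :=
  if reference_gloss = "" then false
  else
    let our_words : PySem.Set String :=
      PySem.Set.ofList (PySem.Str.split₀ (PySem.Str.replace (PySem.Str.lower our_gloss) "," " "))
    let ref_words : PySem.Set String :=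
      PySem.Set.ofList (PySem.Str.split₀ (PySem.Str.replace (PySem.Str.lower reference_gloss) "," " "))
    if !(PySem.Set.inter our_words ref_words).isEmpty then true
    else
      our_words.any (fun w =>
        !(PySem.Set.inter (pvAdjacency.getD w PySem.Set.empty) ref_words).isEmpty)

-- ===== PRECONDITION & SPEC =====
def Spec_check_semantic_match (our_gloss : String) (reference_gloss : String) (out : Bool) : Prop := out = check_semantic_match_alt our_gloss reference_gloss
instance (our_gloss : String) (reference_gloss : String) (out : Bool) : Decidable (Spec_check_semantic_match our_gloss reference_gloss out) := by unfold Spec_check_semantic_match; infer_instance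

-- ===== CLAIM (what is proved, stated in full; the proofs are below) =====
def Claim_equal_check_semantic_match : Prop := ∀ (our_gloss : String) (reference_gloss : String), Dom_check_semantic_match our_gloss reference_gloss → Spec_check_semantic_match our_gloss reference_gloss (check_semantic_match our_gloss reference_gloss)

-- ===== LEMMAS AND PROOFS =====

-- the key↔synonym star edges of the fixed table, as (key, synonym) pairs
def pvEdges : List (String × String) :=
  pvSynonyms.items.flatMap (fun kv => kv.2.map (fun s => (kv.1, s)))

-- the pairs (word, linked word) recorded by the adjacency index
def pvAdjEdges : List (String × String) :=
  pvAdjacency.items.flatMap (fun kv => kv.2.map (fun s => (kv.1, s)))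

-- membership in getD of a dict with distinct keys = a pair in its flattened items
lemma pv_mem_getD_iff {κ ν : Type} [BEq κ] [LawfulBEq κ]
    (l : List (κ × List ν)) (hn : (l.map Prod.fst).Nodup) (w : κ) (v : ν) :
    v ∈ (PySem.Dict.mk l).getD w [] ↔ (w, v) ∈ l.flatMap (fun kv => kv.2.map (fun s => (kv.1, s))) := by
  induction l with
  | nil => simp [PySem.Dict.getD, PySem.Dict.get?]
  | cons kv rest ih =>
    obtain ⟨k, vs⟩ := kv
    simp only [List.map_cons, List.nodup_cons, List.mem_map] at hn
    obtain ⟨hk, hrest⟩ := hn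
    simp only [PySem.Dict.getD, PySem.Dict.get?_mk_cons]
    have hrw : ((PySem.Dict.mk rest).get? w).getD [] = (PySem.Dict.mk rest).getD w [] := rfl
    by_cases hwk : k = w
    · subst hwk
      simp only [BEq.refl, if_true, Option.getD_some, List.flatMap_cons, List.mem_append,
        List.mem_map, List.mem_flatMap, Prod.mk.injEq]
      constructor
      · intro hv; exact Or.inl ⟨v, hv, trivial, rfl⟩
      · rintro (⟨s, hs, -, rfl⟩ | ⟨ab, hab, hmap⟩)
        · exact hs
        · obtain ⟨a, ha, h1, rfl⟩ := hmap
          exact absurd ⟨ab, hab, h1⟩ hk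
    · rw [if_neg (by simpa using hwk), hrw]
      rw [ih hrest]
      simp only [List.flatMap_cons, List.mem_append, List.mem_map, Prod.mk.injEq]
      constructor
      · intro h; exact Or.inr h
      · rintro (⟨s, hs, rfl, rfl⟩ | h)
        · exact absurd rfl hwk
        · exact h

set_option maxRecDepth 4096 in
lemma pv_adj_edges (p : String × String) :
    p ∈ pvAdjEdges ↔ p ∈ pvEdges ∨ (p.2, p.1) ∈ pvEdges := by
  obtain ⟨a, b⟩ := p
  have h1 : pvAdjEdges ⊆ pvEdges ++ pvEdges.map (fun q => (q.2, q.1)) := by decide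
  have h2 : pvEdges ++ pvEdges.map (fun q => (q.2, q.1)) ⊆ pvAdjEdges := by decide
  constructor
  · intro hp
    rcases List.mem_append.1 (h1 hp) with h | h
    · exact Or.inl h
    · obtain ⟨⟨x, y⟩, hq, heq⟩ := List.mem_map.1 h
      obtain ⟨rfl, rfl⟩ := Prod.mk.injEq .. ▸ heq
      exact Or.inr hq
  · intro hp
    apply h2
    rcases hp with h | h
    · exact List.mem_append.2 (Or.inl h)
    · exact List.mem_append.2 (Or.inr (List.mem_map.2 ⟨(b, a), h, rfl⟩))

-- per-word: A's table scans = B's adjacency lookup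
set_option maxRecDepth 8192 in
lemma pv_perWord (ref : PySem.Set String) (w : String) :
    ((match pvSynonyms.get? w with
      | some syns => syns.any (fun syn => PySem.Set.contains ref syn)
      | none => false)
     || pvSynonyms.items.any (fun kv => kv.2.contains w && PySem.Set.contains ref kv.1))
    = !(PySem.Set.inter (pvAdjacency.getD w PySem.Set.empty) ref).isEmpty := by
  have hsyn : ∀ v : String, v ∈ pvSynonyms.getD w [] ↔ (w, v) ∈ pvEdges :=
    fun v => pv_mem_getD_iff pvSynonyms.items (by decide) w v
  have hadj : ∀ v : String, v ∈ pvAdjacency.getD w PySem.Set.empty ↔ (w, v) ∈ pvAdjEdges :=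
    fun v => pv_mem_getD_iff pvAdjacency.items (by decide) w v
  have hA : (match pvSynonyms.get? w with
      | some syns => syns.any (fun syn => PySem.Set.contains ref syn)
      | none => false) = (pvSynonyms.getD w []).any (fun syn => PySem.Set.contains ref syn) := by
    simp only [PySem.Dict.getD]
    cases pvSynonyms.get? w <;> simp
  rw [Bool.eq_iff_iff, hA]
  simp only [Bool.or_eq_true, List.any_eq_true, Bool.and_eq_true, PySem.Set.contains,
    List.contains_iff_mem, Bool.not_eq_true', List.isEmpty_eq_false_iff_exists_mem]
  constructor
  · rintro (⟨v, hv, hr⟩ | ⟨kv, hkv, hw, hr⟩)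
    · exact ⟨v, (PySem.Set.mem_inter _ ref v).2
        ⟨(hadj v).2 ((pv_adj_edges (w, v)).2 (Or.inl ((hsyn v).1 hv))), hr⟩⟩
    · refine ⟨kv.1, (PySem.Set.mem_inter _ ref kv.1).2 ⟨(hadj kv.1).2 ?_, hr⟩⟩
      refine (pv_adj_edges (w, kv.1)).2 (Or.inr ?_)
      simp only [pvEdges, List.mem_flatMap, List.mem_map]
      exact ⟨kv, hkv, w, hw, rfl⟩
  · rintro ⟨v, hv⟩
    obtain ⟨hva, hvr⟩ := (PySem.Set.mem_inter _ ref v).1 hv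
    rcases (pv_adj_edges (w, v)).1 ((hadj v).1 hva) with h | h
    · exact Or.inl ⟨v, (hsyn v).2 h, hvr⟩
    · simp only [pvEdges, List.mem_flatMap, List.mem_map] at h
      obtain ⟨kv, hkv, s, hs, heq⟩ := h
      obtain ⟨rfl, rfl⟩ := Prod.mk.injEq .. ▸ heq
      exact Or.inr ⟨kv, hkv, hs, hvr⟩

-- ===== VERDICT (by name: the statement is the Claim_ definition above) =====
theorem check_semantic_match_spec : Claim_equal_check_semantic_match := by
  intro og rg _
  unfold Spec_check_semantic_match check_semantic_match check_semantic_match_alt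
  by_cases h : rg = ""
  · simp [h]
  · simp only [if_neg h]
    rw [funext (pv_perWord (PySem.Set.ofList (PySem.Str.split₀ (PySem.Str.replace (PySem.Str.lower rg) "," " "))))]
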